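-- pv_equiv track=rewrite | github.com/INSM-TUM-Teaching/business-process-redesign | change_operations/delete_operation.py | delete_activity_from_variants
-- ===== SOURCE A (Python) =====
-- from typing import List, Set
--
-- def delete_activity_from_variants(
--     variants: List[List[str]], activity: str, remove_duplicates: bool = False
-- ) -> List[List[str]]:
--     """
--     Removes the specified activity from all acceptance variants.
--
--     Args:
--         variants: List of variants to process
--         activity: Activity to remove from all variants
--         remove_duplicates: If True, removes duplicate variants after removing the activity
--
--     Returns:
--         New variants with the activity removed, with or without duplicates based on remove_duplicates
--     """
--     modified_variants = []
--     seen = set()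
--
--     for variant in variants:
--         # Remove activity from variant if present
--         modified_variant = [act for act in variant if act != activity]
--         # Only add non-empty variants
--         if modified_variant:
--             if remove_duplicates:
--                 variant_tuple = tuple(modified_variant)
--                 if variant_tuple not in seen:
--                     seen.add(variant_tuple)
--                     modified_variants.append(modified_variant)
--             else:
--                 modified_variants.append(modified_variant)
--
--     return modified_variants
-- ===== SOURCE B (Python) =====
-- def delete_activity_from_variants(variants, activity, remove_duplicates=False):
--     """Recursive decomposition: process the head, recurse on the tail; dedup by
--     filtering later duplicates of the head out of the recursive result (no seen set)."""
--     if not variants: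
--         return []
--     head = [a for a in variants[0] if a != activity]
--     rest = delete_activity_from_variants(variants[1:], activity, remove_duplicates)
--     if not head:
--         return rest
--     if remove_duplicates:
--         return [head] + [v for v in rest if v != head]
--     return [head] + rest
-- ===== Notes on version B (the rewrite author's own statement) =====
-- stated objective: alternative
-- what changed: Replaces A's iterative loop with an explicit seen-set by structural recursion on the variant list: the head is processed, and deduplication is done by filtering later duplicates of the head out of the recursive result, with no auxiliary set at all.
import Mathlib
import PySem

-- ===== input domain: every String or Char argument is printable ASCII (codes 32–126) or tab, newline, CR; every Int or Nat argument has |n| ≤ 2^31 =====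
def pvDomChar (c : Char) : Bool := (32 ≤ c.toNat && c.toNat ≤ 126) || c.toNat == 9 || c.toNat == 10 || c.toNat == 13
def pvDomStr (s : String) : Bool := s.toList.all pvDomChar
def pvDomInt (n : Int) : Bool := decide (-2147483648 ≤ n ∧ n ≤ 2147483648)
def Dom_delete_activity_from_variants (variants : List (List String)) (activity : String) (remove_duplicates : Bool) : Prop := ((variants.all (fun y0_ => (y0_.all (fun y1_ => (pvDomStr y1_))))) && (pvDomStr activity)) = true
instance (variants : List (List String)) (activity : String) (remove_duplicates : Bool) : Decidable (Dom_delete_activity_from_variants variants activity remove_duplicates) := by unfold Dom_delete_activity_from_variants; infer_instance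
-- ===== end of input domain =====

-- B replaces A's iterative loop with a `seen` set by structural recursion on the
-- variant list, deduplicating by filtering later copies of the head out of the
-- recursive result; objective: alternative (no speed claim).

-- ===== PORT A =====
-- loop body of A, carrying (modified_variants, seen)
def pvStepA (activity : String) (remove_duplicates : Bool)
    (st : List (List String) × PySem.Set (List String)) (variant : List String) :
    List (List String) × PySem.Set (List String) :=
  let modified_variant := variant.filter (fun act => act ≠ activity)
  if modified_variant.isEmpty then st
  else if remove_duplicates then
    if PySem.Set.contains st.2 modified_variant then st
    else (st.1 ++ [modified_variant], PySem.Set.add st.2 modified_variant)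
  else (st.1 ++ [modified_variant], st.2)

def delete_activity_from_variants (variants : List (List String)) (activity : String) (remove_duplicates : Bool) : List (List String) :=
  (variants.foldl (pvStepA activity remove_duplicates) ([], PySem.Set.empty)).1

-- ===== PORT B =====
-- recursion on the list: process the head, recurse on the tail, and (when
-- deduplicating) filter later duplicates of the head out of the recursive result
def delete_activity_from_variants_alt (variants : List (List String)) (activity : String) (remove_duplicates : Bool) : List (List String) :=
  match variants with
  | [] => []
  | v :: vs =>
    let head := v.filter (fun a => a ≠ activity)
    let rest := delete_activity_from_variants_alt vs activity remove_duplicates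
    if head.isEmpty then rest
    else if remove_duplicates then head :: rest.filter (fun x => x ≠ head)
    else head :: rest

-- ===== PRECONDITION & SPEC =====
def Spec_delete_activity_from_variants (variants : List (List String)) (activity : String) (remove_duplicates : Bool) (out : List (List String)) : Prop := out = delete_activity_from_variants_alt variants activity remove_duplicates
instance (variants : List (List String)) (activity : String) (remove_duplicates : Bool) (out : List (List String)) : Decidable (Spec_delete_activity_from_variants variants activity remove_duplicates out) := by unfold Spec_delete_activity_from_variants; infer_instance

-- ===== CLAIM (what is proved, stated in full; the proofs are below) =====
def Claim_equal_delete_activity_from_variants : Prop := ∀ (variants : List (List String)) (activity : String) (remove_duplicates : Bool), Dom_delete_activity_from_variants variants activity remove_duplicates → Spec_delete_activity_from_variants variants activity remove_duplicates (delete_activity_from_variants variants activity remove_duplicates)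

-- ===== LEMMAS AND PROOFS =====

-- first-occurrence dedup by head-filtering (B's dedup mechanism, abstracted)
def pvDedup (l : List (List String)) : List (List String) :=
  match l with
  | [] => []
  | x :: xs => x :: (pvDedup xs).filter (fun y => y ≠ x)

-- rd = false: A's loop appends every non-empty filtered variant
theorem pvA_loop_false (activity : String) (variants : List (List String))
    (acc : List (List String)) (s : PySem.Set (List String)) :
    (variants.foldl (pvStepA activity false) (acc, s)).1
    = acc ++ (variants.map (fun v => v.filter (fun a => a ≠ activity))).filter (fun v => !v.isEmpty) := by
  induction variants generalizing acc s with
  | nil => simp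
  | cons v vs ih =>
    simp only [List.foldl_cons, List.map_cons, List.filter_cons, pvStepA]
    by_cases h : (v.filter (fun a => a ≠ activity)).isEmpty
    · rw [if_pos h, ih]
      simp only [h, Bool.not_true, Bool.false_eq_true, if_false]
    · have h' : (!(v.filter (fun a => a ≠ activity)).isEmpty) = true := by simpa using h
      rw [if_neg h, if_pos h']
      simp only [Bool.false_eq_true, if_false, ih, List.append_assoc,
        List.singleton_append]

-- rd = true: from the synchronized state (acc, acc), the loop produces acc followed
-- by the deduplicated new elements not already in acc
theorem pvA_loop_true (activity : String) (variants : List (List String))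
    (acc : List (List String)) :
    (variants.foldl (pvStepA activity true) (acc, acc)).1
    = acc ++ (pvDedup ((variants.map (fun v => v.filter (fun a => a ≠ activity))).filter (fun v => !v.isEmpty))).filter (fun y => !acc.contains y) := by
  induction variants generalizing acc with
  | nil => simp [pvDedup]
  | cons v vs ih =>
    simp only [List.foldl_cons, List.map_cons, List.filter_cons, pvStepA]
    by_cases h : (v.filter (fun a => a ≠ activity)).isEmpty
    · rw [if_pos h, ih]
      simp only [h, Bool.not_true, Bool.false_eq_true, if_false]
    · have h' : (!(v.filter (fun a => a ≠ activity)).isEmpty) = true := by simpa using h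
      set m := v.filter (fun a => a ≠ activity) with hm
      rw [if_neg h, if_pos h']
      simp only [pvDedup, List.filter_cons]
      by_cases hc : PySem.Set.contains acc m
      · have hcl : acc.contains m = true := by simpa [PySem.Set.contains] using hc
        rw [if_pos hc]
        simp only [if_true, hcl, Bool.not_true, Bool.false_eq_true, if_false]
        rw [ih]
        congr 1
        rw [List.filter_filter, List.filter_congr]
        intro y _
        cases hy : acc.contains y with
        | true => simp
        | false =>
          have hne : y ≠ m := fun e => by rw [e, hcl] at hy; exact absurd hy (by simp)
          simp [hne]
      · have hcl : acc.contains m = false := by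
          simpa [PySem.Set.contains] using hc
        have hadd : PySem.Set.add acc m = acc ++ [m] := by
          simp only [PySem.Set.add]
          rw [if_neg (by simpa [PySem.Set.contains] using hc)]
        rw [if_neg hc]
        simp only [if_true, hadd, hcl, Bool.not_false]
        rw [ih]
        simp only [List.append_assoc, List.singleton_append]
        congr 2
        rw [List.filter_filter, List.filter_congr]
        intro y _
        simp [Bool.not_or]

-- B computes pvDedup of the filtered pipeline when rd = true
theorem pvB_true (activity : String) (variants : List (List String)) :
    delete_activity_from_variants_alt variants activity true
    = pvDedup ((variants.map (fun v => v.filter (fun a => a ≠ activity))).filter (fun v => !v.isEmpty)) := by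
  induction variants with
  | nil => simp [delete_activity_from_variants_alt, pvDedup]
  | cons v vs ih =>
    simp only [delete_activity_from_variants_alt, List.map_cons, List.filter_cons]
    by_cases h : (v.filter (fun a => a ≠ activity)).isEmpty
    · rw [if_pos h, ih]
      simp only [h, Bool.not_true, Bool.false_eq_true, if_false]
    · have h' : (!(v.filter (fun a => a ≠ activity)).isEmpty) = true := by simpa using h
      rw [if_neg h, if_pos h', ih]
      simp only [if_true, pvDedup]

-- B computes the plain filtered pipeline when rd = false
theorem pvB_false (activity : String) (variants : List (List String)) :
    delete_activity_from_variants_alt variants activity false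
    = (variants.map (fun v => v.filter (fun a => a ≠ activity))).filter (fun v => !v.isEmpty) := by
  induction variants with
  | nil => simp [delete_activity_from_variants_alt]
  | cons v vs ih =>
    simp only [delete_activity_from_variants_alt, List.map_cons, List.filter_cons]
    by_cases h : (v.filter (fun a => a ≠ activity)).isEmpty
    · rw [if_pos h, ih]
      simp only [h, Bool.not_true, Bool.false_eq_true, if_false]
    · have h' : (!(v.filter (fun a => a ≠ activity)).isEmpty) = true := by simpa using h
      rw [if_neg h, if_pos h', ih]
      simp only [Bool.false_eq_true, if_false]

-- ===== VERDICT (by name: the statement is the Claim_ definition above) =====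
theorem delete_activity_from_variants_spec : Claim_equal_delete_activity_from_variants := by
  intro variants activity remove_duplicates _
  unfold Spec_delete_activity_from_variants delete_activity_from_variants
  cases remove_duplicates with
  | false => simpa [pvB_false] using pvA_loop_false activity variants [] PySem.Set.empty
  | true =>
    have h := pvA_loop_true activity variants []
    simp only [PySem.Set.empty] at h ⊢
    rw [h, pvB_true]
    simp
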